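-- pv_equiv track=rewrite | github.com/vishwaspande/Project-Summit | indian_dashboard.py | get_region_for_index
-- ===== SOURCE A (Python) =====
-- def get_region_for_index(index_name: str) -> str:
--     """Get region for an index."""
--     regions = {
--         'North America': ['S&P 500', 'NASDAQ', 'Dow Jones', 'TSX (Canada)'],
--         'Asia Pacific': ['Nikkei 225', 'Hang Seng', 'Shanghai Composite', 'KOSPI', 'Taiwan Weighted', 'ASX 200 (Australia)'],
--         'Europe': ['FTSE 100', 'DAX', 'CAC 40', 'Euro Stoxx 50', 'FTSE MIB'],
--         'Emerging Markets': ['Bovespa (Brazil)', 'FTSE/JSE (South Africa)', 'MSCI Emerging Markets', 'FTSE Emerging'],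
--         'Commodities': ['Gold', 'Crude Oil', 'Silver', 'Copper']
--     }
--
--     for region, indices in regions.items():
--         if index_name in indices:
--             return region
--     return 'Other'
-- ===== SOURCE B (Python) =====
-- # Flat inverted lookup table: index name -> region, one direct lookup, no scanning.
-- _INDEX_TO_REGION = {
--     'S&P 500': 'North America', 'NASDAQ': 'North America',
--     'Dow Jones': 'North America', 'TSX (Canada)': 'North America',
--     'Nikkei 225': 'Asia Pacific', 'Hang Seng': 'Asia Pacific',
--     'Shanghai Composite': 'Asia Pacific', 'KOSPI': 'Asia Pacific',
--     'Taiwan Weighted': 'Asia Pacific', 'ASX 200 (Australia)': 'Asia Pacific',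
--     'FTSE 100': 'Europe', 'DAX': 'Europe', 'CAC 40': 'Europe',
--     'Euro Stoxx 50': 'Europe', 'FTSE MIB': 'Europe',
--     'Bovespa (Brazil)': 'Emerging Markets', 'FTSE/JSE (South Africa)': 'Emerging Markets',
--     'MSCI Emerging Markets': 'Emerging Markets', 'FTSE Emerging': 'Emerging Markets',
--     'Gold': 'Commodities', 'Crude Oil': 'Commodities',
--     'Silver': 'Commodities', 'Copper': 'Commodities',
-- }
--
-- def get_region_for_index(index_name: str) -> str:
--     """Get region for an index."""
--     return _INDEX_TO_REGION.get(index_name, 'Other')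
-- ===== Notes on version B (the rewrite author's own statement) =====
-- stated objective: idiomatic
-- what changed: B replaces the per-call scan over region lists by a flat precomputed index->region dict and a single .get lookup with the 'Other' default; the membership loop disappears entirely.
import Mathlib
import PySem

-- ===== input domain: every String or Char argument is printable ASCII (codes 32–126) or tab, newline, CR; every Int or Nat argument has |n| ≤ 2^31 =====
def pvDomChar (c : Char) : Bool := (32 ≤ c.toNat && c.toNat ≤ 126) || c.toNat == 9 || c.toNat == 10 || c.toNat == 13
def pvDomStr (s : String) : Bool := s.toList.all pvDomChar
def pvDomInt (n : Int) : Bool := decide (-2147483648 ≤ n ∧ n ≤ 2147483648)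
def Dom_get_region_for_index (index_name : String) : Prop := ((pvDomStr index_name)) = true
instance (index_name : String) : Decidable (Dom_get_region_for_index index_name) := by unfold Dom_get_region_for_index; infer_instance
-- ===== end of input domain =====

-- B replaces A's per-call scan over region lists by a flat precomputed index→region table and a single lookup (objective: idiomatic).

-- ===== PORT A =====
-- the literal nested regions table from A, as an insertion-ordered association list
def pvRegions : List (String × List String) :=
  [("North America", ["S&P 500", "NASDAQ", "Dow Jones", "TSX (Canada)"]),
   ("Asia Pacific", ["Nikkei 225", "Hang Seng", "Shanghai Composite", "KOSPI", "Taiwan Weighted", "ASX 200 (Australia)"]),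
   ("Europe", ["FTSE 100", "DAX", "CAC 40", "Euro Stoxx 50", "FTSE MIB"]),
   ("Emerging Markets", ["Bovespa (Brazil)", "FTSE/JSE (South Africa)", "MSCI Emerging Markets", "FTSE Emerging"]),
   ("Commodities", ["Gold", "Crude Oil", "Silver", "Copper"])]

-- A's loop: first region whose index list contains index_name, else 'Other'
def pvScan (index_name : String) : List (String × List String) → String
  | [] => "Other"
  | (region, indices) :: rest =>
      if indices.contains index_name then region else pvScan index_name rest

def get_region_for_index (index_name : String) : String :=
  pvScan index_name pvRegions

-- ===== PORT B =====
-- B's own flat literal table: index name → region (the _INDEX_TO_REGION dict of Source B)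
def pvIndexToRegion : PySem.Dict String String := PySem.Dict.mk
  [("S&P 500", "North America"), ("NASDAQ", "North America"),
   ("Dow Jones", "North America"), ("TSX (Canada)", "North America"),
   ("Nikkei 225", "Asia Pacific"), ("Hang Seng", "Asia Pacific"),
   ("Shanghai Composite", "Asia Pacific"), ("KOSPI", "Asia Pacific"),
   ("Taiwan Weighted", "Asia Pacific"), ("ASX 200 (Australia)", "Asia Pacific"),
   ("FTSE 100", "Europe"), ("DAX", "Europe"), ("CAC 40", "Europe"),
   ("Euro Stoxx 50", "Europe"), ("FTSE MIB", "Europe"),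
   ("Bovespa (Brazil)", "Emerging Markets"), ("FTSE/JSE (South Africa)", "Emerging Markets"),
   ("MSCI Emerging Markets", "Emerging Markets"), ("FTSE Emerging", "Emerging Markets"),
   ("Gold", "Commodities"), ("Crude Oil", "Commodities"),
   ("Silver", "Commodities"), ("Copper", "Commodities")]

def get_region_for_index_alt (index_name : String) : String :=
  pvIndexToRegion.getD index_name "Other"

-- ===== PRECONDITION & SPEC =====
def Spec_get_region_for_index (index_name : String) (out : String) : Prop := out = get_region_for_index_alt index_name
instance (index_name : String) (out : String) : Decidable (Spec_get_region_for_index index_name out) := by unfold Spec_get_region_for_index; infer_instance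

-- ===== CLAIM (what is proved, stated in full; the proofs are below) =====
def Claim_equal_get_region_for_index : Prop := ∀ (index_name : String), Dom_get_region_for_index index_name → Spec_get_region_for_index index_name (get_region_for_index index_name)

-- ===== LEMMAS AND PROOFS =====
-- a key absent from every pair of a literal dict looks up to none
theorem pvGet?_none (s : String) (l : List (String × String))
    (h : ∀ p ∈ l, ¬ s = p.1) : (PySem.Dict.mk l).get? s = none := by
  induction l with
  | nil => rfl
  | cons p rest ih =>
      rw [PySem.Dict.get?_mk_cons]
      have hp : ¬ s = p.1 := h p (List.mem_cons_self ..)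
      simp only [beq_eq_false_iff_ne.mpr (fun e => hp e.symm), Bool.false_eq_true, if_false]
      exact ih fun q hq => h q (List.mem_cons_of_mem _ hq)

set_option maxHeartbeats 1000000 in
theorem ports_eq (s : String) : get_region_for_index s = get_region_for_index_alt s := by
  simp only [get_region_for_index, get_region_for_index_alt, pvIndexToRegion, pvRegions,
    pvScan, PySem.Dict.getD, List.contains]
  split_ifs with h1 h2 h3 h4 h5
  · have hm := List.mem_of_elem_eq_true h1; fin_cases hm <;> decide
  · have hm := List.mem_of_elem_eq_true h2; fin_cases hm <;> decide
  · have hm := List.mem_of_elem_eq_true h3; fin_cases hm <;> decide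
  · have hm := List.mem_of_elem_eq_true h4; fin_cases hm <;> decide
  · have hm := List.mem_of_elem_eq_true h5; fin_cases hm <;> decide
  · simp only [List.elem_eq_contains, List.contains_eq_mem, List.mem_cons,
      List.not_mem_nil, or_false, decide_eq_true_eq, not_or] at h1 h2 h3 h4 h5
    rw [pvGet?_none]
    · rfl
    · intro p hp
      fin_cases hp <;> simp_all

-- ===== VERDICT (by name: the statement is the Claim_ definition above) =====
theorem get_region_for_index_spec : Claim_equal_get_region_for_index := by
  intro s _
  exact ports_eq s
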